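-- pv_equiv track=rewrite | github.com/sebastianspicker/humanized-selenium-scraper | humanized_selenium_scraper/io.py | parse_columns_arg
-- ===== SOURCE A (Python) =====
-- def parse_columns_arg(value: str) -> list[str]:
--     cols = [c.strip() for c in value.split(",") if c.strip()]
--     if not cols:
--         raise ValueError(
--             "--columns must not be empty. Provide comma-separated column names, "
--             "e.g. --columns name,street,plz,city"
--         )
--     if len(set(cols)) != len(cols):
--         duplicates = [c for c in cols if cols.count(c) > 1]
--         raise ValueError(
--             f"--columns contains duplicate name(s): {', '.join(sorted(set(duplicates)))}. "
--             "Each column name must be unique."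
--         )
--     return cols
-- ===== SOURCE B (Python) =====
-- def parse_columns_arg(value: str) -> list[str]:
--     cols = []
--     for piece in value.split(","):
--         name = piece.strip()
--         if name:
--             cols.append(name)
--     if not cols:
--         raise ValueError(
--             "--columns must not be empty. Provide comma-separated column names, "
--             "e.g. --columns name,street,plz,city"
--         )
--     ordered = sorted(cols)
--     dups = []
--     for prev, cur in zip(ordered, ordered[1:]):
--         if prev == cur and (not dups or dups[-1] != cur):
--             dups.append(cur)
--     if dups:
--         raise ValueError(
--             f"--columns contains duplicate name(s): {', '.join(dups)}. "
--             "Each column name must be unique."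
--         )
--     return cols
-- ===== Notes on version B (the rewrite author's own statement) =====
-- stated objective: alternative
-- what changed: Duplicate detection by sorting the names and scanning adjacent pairs (which yields the duplicate names already deduplicated and in sorted order), instead of A's set-size comparison followed by a quadratic cols.count rescan plus sorted(set(...)).
import Mathlib
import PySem

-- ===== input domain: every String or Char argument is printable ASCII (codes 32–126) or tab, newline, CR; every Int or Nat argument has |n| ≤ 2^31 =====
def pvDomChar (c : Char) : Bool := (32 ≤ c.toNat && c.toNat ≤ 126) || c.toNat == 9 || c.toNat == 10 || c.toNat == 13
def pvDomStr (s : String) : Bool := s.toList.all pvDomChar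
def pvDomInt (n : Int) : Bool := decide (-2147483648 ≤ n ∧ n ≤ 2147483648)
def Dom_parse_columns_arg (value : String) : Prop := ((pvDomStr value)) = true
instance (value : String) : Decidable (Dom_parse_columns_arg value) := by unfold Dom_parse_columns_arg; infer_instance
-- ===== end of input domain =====

-- B detects duplicates by sorting the names and scanning adjacent pairs, instead of A's
-- set-size comparison plus quadratic count rescan (objective: alternative; both raise identically outside Pre_).

-- value.split(",")  (sep "," is nonempty, so split? always returns some)
def pvSplit (value : String) : List String := (PySem.Str.split? value ",").getD []

-- ===== PORT A =====
-- cols = [c.strip() for c in value.split(",") if c.strip()]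
def parse_columns_arg (value : String) : List String :=
  let cols := (pvSplit value).filterMap
    (fun c => if PySem.Str.strip c ≠ "" then some (PySem.Str.strip c) else none)
  if cols = [] then []                                     -- Python raises ValueError here (excluded by Pre_)
  else if (PySem.Set.ofList cols).length ≠ cols.length then []  -- Python raises ValueError here (excluded by Pre_)
  else cols

-- ===== PORT B =====
-- the loop over zip(ordered, ordered[1:]) collecting adjacent duplicates
def pvDupStep (dups : List String) (pc : String × String) : List String :=
  if pc.1 = pc.2 ∧ (dups = [] ∨ dups.getLast? ≠ some pc.2) then dups ++ [pc.2] else dups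

def parse_columns_arg_alt (value : String) : List String :=
  let cols := (pvSplit value).foldl
    (fun acc piece =>
      let name := PySem.Str.strip piece
      if name ≠ "" then acc ++ [name] else acc) []
  if cols = [] then []                                     -- Python raises ValueError here (excluded by Pre_)
  else
    let ordered := PySem.List.sorted cols (fun x => x) false
    let dups := (ordered.zip ordered.tail).foldl pvDupStep []
    if dups ≠ [] then []                                   -- Python raises ValueError here (excluded by Pre_)
    else cols

-- ===== PRECONDITION & SPEC =====
-- Pre_ excludes exactly the inputs on which the Python A (and B) raise ValueError:
-- those whose stripped comma-separated pieces are all empty, or contain a duplicate name.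
def Pre_parse_columns_arg (value : String) : Prop :=
  let names := (pvSplit value).filterMap
    (fun c => if PySem.Str.strip c ≠ "" then some (PySem.Str.strip c) else none)
  names ≠ [] ∧ names.Nodup
instance (value : String) : Decidable (Pre_parse_columns_arg value) := by
  unfold Pre_parse_columns_arg; infer_instance
def pvWitness_parse_columns_arg : String := "name, street,plz"

def Spec_parse_columns_arg (value : String) (out : List String) : Prop := out = parse_columns_arg_alt value
instance (value : String) (out : List String) : Decidable (Spec_parse_columns_arg value out) := by unfold Spec_parse_columns_arg; infer_instance

-- ===== CLAIM (what is proved, stated in full; the proofs are below) =====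
def Claim_equal_parse_columns_arg : Prop := ∀ (value : String), Dom_parse_columns_arg value → Pre_parse_columns_arg value → Spec_parse_columns_arg value (parse_columns_arg value)

-- ===== LEMMAS AND PROOFS =====

-- the stripped-nonempty names of a piece list
def pvNames (ps : List String) : List String :=
  ps.filterMap (fun c => if PySem.Str.strip c ≠ "" then some (PySem.Str.strip c) else none)

-- set(xs) built by foldl add over a duplicate-free extension just appends
theorem pvFoldlAdd_of_nodup (xs acc : List String) (h : (acc ++ xs).Nodup) :
    xs.foldl PySem.Set.add acc = acc ++ xs := by
  induction xs generalizing acc with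
  | nil => simp
  | cons a t ih =>
    have ha : a ∉ acc := fun hm =>
      (List.disjoint_of_nodup_append h) hm List.mem_cons_self
    rw [List.foldl_cons, PySem.Set.add_of_not_mem ha, ih]
    · simp
    · simpa using h

-- adjacent pairs of a duplicate-free list are unequal
theorem pvZipTail_ne (l : List String) (h : l.Nodup) :
    ∀ pc ∈ l.zip l.tail, pc.1 ≠ pc.2 := by
  induction l with
  | nil => simp
  | cons a t ih =>
    intro pc hm
    cases t with
    | nil => simp at hm
    | cons b u =>
      simp only [List.tail_cons, List.zip_cons_cons, List.mem_cons] at hm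
      rcases hm with rfl | hm
      · simp only [List.nodup_cons, List.mem_cons] at h
        exact fun he => h.1 (Or.inl he)
      · exact ih h.of_cons pc (by simpa using hm)
  
-- the duplicate-collecting fold is the identity when every pair is unequal
theorem pvFoldDup_id (ps : List (String × String)) (acc : List String)
    (h : ∀ pc ∈ ps, pc.1 ≠ pc.2) : ps.foldl pvDupStep acc = acc := by
  induction ps generalizing acc with
  | nil => rfl
  | cons p t ih =>
    rw [List.foldl_cons]
    have : pvDupStep acc p = acc := by
      simp [pvDupStep, h p List.mem_cons_self]
    rw [this]
    exact ih acc (fun pc hm => h pc (List.mem_cons_of_mem _ hm))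

-- the name-accumulating loop builds exactly the filterMap of stripped nonempty pieces
theorem pvFoldCols (ps : List String) (acc : List String) :
    ps.foldl (fun acc piece =>
      let name := PySem.Str.strip piece
      if name ≠ "" then acc ++ [name] else acc) acc = acc ++ pvNames ps := by
  induction ps generalizing acc with
  | nil => simp [pvNames]
  | cons p t ih =>
    rw [List.foldl_cons]
    by_cases hp : PySem.Str.strip p = ""
    · have hstep : (let name := PySem.Str.strip p
                    if name ≠ "" then acc ++ [name] else acc) = acc := by simp [hp]
      rw [hstep, ih]
      simp [pvNames, hp]
    · have hstep : (let name := PySem.Str.strip p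
                    if name ≠ "" then acc ++ [name] else acc) = acc ++ [PySem.Str.strip p] := by
        simp [hp]
      rw [hstep, ih]
      simp [pvNames, hp]

-- ===== VERDICT (by name: the statement is the Claim_ definition above) =====
theorem parse_columns_arg_spec : Claim_equal_parse_columns_arg := by
  intro value _ hpre
  obtain ⟨hne, hnd⟩ := hpre
  have hne' : pvNames (pvSplit value) ≠ [] := hne
  have hnd' : (pvNames (pvSplit value)).Nodup := hnd
  have hofList : PySem.Set.ofList (pvNames (pvSplit value)) = pvNames (pvSplit value) := by
    simpa [PySem.Set.ofList_eq_foldl] using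
      pvFoldlAdd_of_nodup (pvNames (pvSplit value)) [] (by simpa using hnd')
  have hA : parse_columns_arg value = pvNames (pvSplit value) := by
    show (if pvNames (pvSplit value) = [] then []
          else if (PySem.Set.ofList (pvNames (pvSplit value))).length ≠ (pvNames (pvSplit value)).length then []
          else pvNames (pvSplit value)) = pvNames (pvSplit value)
    rw [if_neg hne', hofList, if_neg (by simp)]
  have hB : parse_columns_arg_alt value = pvNames (pvSplit value) := by
    have hcols : (pvSplit value).foldl
        (fun acc piece =>
          let name := PySem.Str.strip piece
          if name ≠ "" then acc ++ [name] else acc) [] = pvNames (pvSplit value) :=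
      pvFoldCols (pvSplit value) []
    show (let cols := (pvSplit value).foldl
            (fun acc piece =>
              let name := PySem.Str.strip piece
              if name ≠ "" then acc ++ [name] else acc) []
          if cols = [] then []
          else
            let ordered := PySem.List.sorted cols (fun x => x) false
            let dups := (ordered.zip ordered.tail).foldl pvDupStep []
            if dups ≠ [] then [] else cols) = pvNames (pvSplit value)
    rw [show ((pvSplit value).foldl
            (fun acc piece =>
              let name := PySem.Str.strip piece
              if name ≠ "" then acc ++ [name] else acc) []) = pvNames (pvSplit value) from hcols]
    have hordnd : (PySem.List.sorted (pvNames (pvSplit value)) (fun x => x) false).Nodup :=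
      (PySem.List.sorted_perm (pvNames (pvSplit value)) (fun x => x) false).nodup_iff.mpr hnd'
    have hdups := pvFoldDup_id _ [] (pvZipTail_ne _ hordnd)
    simp only [hdups]
    simp [hne']
  unfold Spec_parse_columns_arg
  rw [hA, hB]
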